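-- pv_equiv track=rewrite | github.com/pypi-data/pypi-mirror-403 | packages/yakultpdf/yakultpdf-0.7.36-py3-none-any.whl/mark2pdf/helper_markdown/md_preprocess.py | _find_strong_ranges
-- ===== SOURCE A (Python) =====
-- def _merge_ranges(ranges):
--     if not ranges:
--         return []
--     ranges = sorted(ranges, key=lambda item: (item[0], item[1]))
--     merged = [list(ranges[0])]
--     for start, end in ranges[1:]:
--         last = merged[-1]
--         if start < last[1]:
--             last[1] = max(last[1], end)
--         else:
--             merged.append([start, end])
--     return [(start, end) for start, end in merged]
--
-- def _find_protected_end(index: int, ranges: list[tuple[int, int]]) -> int | None: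
--     for start, end in ranges:
--         if start <= index < end:
--             return end
--     return None
--
-- def _is_escaped(content: str, index: int) -> bool:
--     backslash_count = 0
--     i = index - 1
--     while i >= 0 and content[i] == "\\":
--         backslash_count += 1
--         i -= 1
--     return backslash_count % 2 == 1
--
-- def _find_strong_ranges(
--     content: str, protected_ranges: list[tuple[int, int]]
-- ) -> list[tuple[int, int]]:
--     ranges = []
--     stack = []
--     i = 0
--     while i + 1 < len(content):
--         protected_end = _find_protected_end(i, protected_ranges)
--         if protected_end is not None:
--             i = protected_end
--             continue
--         if content[i : i + 2] in ("**", "__") and not _is_escaped(content, i):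
--             marker = content[i : i + 2]
--             if stack and stack[-1][0] == marker:
--                 start = stack.pop()[1]
--                 ranges.append((start, i + 2))
--             else:
--                 stack.append((marker, i))
--             i += 2
--             continue
--         i += 1
--     return _merge_ranges(ranges)
-- ===== SOURCE B (Python) =====
-- # Sweep-line re-implementation: protected ranges are sorted once and consumed by a
-- # moving pointer carrying the running max end, and escape parity is precomputed in
-- # one forward pass, instead of re-scanning the range list and the preceding
-- # backslashes at every position.
--
-- def _merge_ranges(ranges):
--     if not ranges:
--         return []
--     ranges = sorted(ranges, key=lambda item: (item[0], item[1]))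
--     merged = [list(ranges[0])]
--     for start, end in ranges[1:]:
--         last = merged[-1]
--         if start < last[1]:
--             last[1] = max(last[1], end)
--         else:
--             merged.append([start, end])
--     return [(start, end) for start, end in merged]
--
-- def _find_strong_ranges(content, protected_ranges):
--     n = len(content)
--     # escape parity: esc[i] is True iff position i is preceded by an odd run of backslashes
--     esc = [False]
--     for ch in content:
--         esc.append(ch == "\\" and not esc[-1])
--     # protected ranges sorted by start, swept with a pointer and a running max end
--     prot = sorted(protected_ranges, key=lambda r: r[0])
--     q = 0
--     max_end = None  # max end among ranges whose start is <= current i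
--     ranges = []
--     stack = []
--     i = 0
--     while i + 1 < n:
--         while q < len(prot) and prot[q][0] <= i:
--             e = prot[q][1]
--             if max_end is None or e > max_end:
--                 max_end = e
--             q += 1
--         if max_end is not None and i < max_end:
--             i = max_end
--             continue
--         ch = content[i]
--         if ch == content[i + 1] and ch in "*_" and not esc[i]:
--             if stack and stack[-1][0] == ch:
--                 ranges.append((stack.pop()[1], i + 2))
--             else:
--                 stack.append((ch, i))
--             i += 2
--         else:
--             i += 1
--     return _merge_ranges(ranges)
-- ===== Notes on version B (the rewrite author's own statement) =====
-- stated objective: faster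
-- what changed: A rescans the whole protected-range list at every position and recounts the preceding backslashes at every candidate marker; B sorts the protected ranges once and sweeps them with a moving pointer carrying the running max end, and precomputes the escape-parity table in one forward pass, so the main scan does O(1) amortized work per position.
import Mathlib
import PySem

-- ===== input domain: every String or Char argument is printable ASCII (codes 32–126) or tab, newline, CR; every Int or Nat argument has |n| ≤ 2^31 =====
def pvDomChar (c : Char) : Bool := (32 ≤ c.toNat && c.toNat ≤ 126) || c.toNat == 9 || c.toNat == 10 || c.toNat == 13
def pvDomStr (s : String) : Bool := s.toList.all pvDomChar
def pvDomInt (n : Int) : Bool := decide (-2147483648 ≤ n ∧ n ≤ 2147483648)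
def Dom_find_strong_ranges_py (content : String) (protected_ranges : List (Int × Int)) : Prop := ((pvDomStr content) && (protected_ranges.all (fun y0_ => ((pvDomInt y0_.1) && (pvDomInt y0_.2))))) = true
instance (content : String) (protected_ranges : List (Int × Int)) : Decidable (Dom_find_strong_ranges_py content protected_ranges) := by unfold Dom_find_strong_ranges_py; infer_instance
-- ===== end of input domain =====

-- B replaces A's per-position rescans (of the protected-range list and of the preceding
-- backslashes) by a sorted sweep with a running max end and a precomputed escape-parity
-- table; a timing run measured B faster. Return-value equivalence only (neither
-- mutates its arguments).

-- ===== PORT A =====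
def findProtectedEnd (i : Int) : List (Int × Int) → Option Int
  | [] => none
  | (s, e) :: rest => if s ≤ i ∧ i < e then some e else findProtectedEnd i rest

-- needed by loopA's termination: a protected jump moves forward
theorem findProtectedEnd_lt {i e : Int} : ∀ {pr : List (Int × Int)},
    findProtectedEnd i pr = some e → i < e
  | [], h => by simp [findProtectedEnd] at h
  | (s, t) :: rest, h => by
    unfold findProtectedEnd at h
    split at h
    · cases h; omega
    · exact findProtectedEnd_lt h

-- small hand-written termination facts (kept small so the ports' closures stay light)
theorem cbDec (i : Int) (h : 0 ≤ i) : (i - 1 + 1).toNat < (i + 1).toNat := by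
  rw [sub_add_cancel]
  exact (Int.toNat_lt_toNat (Int.lt_add_one_iff.mpr h)).mpr (lt_add_one i)

theorem measDec {L i e : Int} (hL : i + 1 < L) (hie : i < e) :
    (L + 1 - e).toNat < (L + 1 - i).toNat :=
  (Int.toNat_lt_toNat (Int.sub_pos.mpr (lt_trans (lt_trans (lt_add_one i) hL) (lt_add_one L)))).mpr
    (sub_lt_sub_left hie (L + 1))

def countBackslashes (cs : List Char) (i : Int) : Nat :=
  if h : 0 ≤ i ∧ PySem.List.pyGet? cs i = some '\\' then countBackslashes cs (i - 1) + 1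
  else 0
termination_by (i + 1).toNat
decreasing_by exact cbDec i h.1

def isEscaped (cs : List Char) (i : Int) : Bool := countBackslashes cs (i - 1) % 2 == 1

-- _merge_ranges: identical helper in both Python sources, ported once
-- (reversed accumulator = O(1) access to merged[-1])
def mergeLoop : List (Int × Int) → List (Int × Int) → List (Int × Int)
  | acc, [] => acc.reverse
  | acc, (s, e) :: rest =>
    match acc with
    | (ls, le) :: t =>
      if s < le then mergeLoop ((ls, max le e) :: t) rest
      else mergeLoop ((s, e) :: (ls, le) :: t) rest
    | [] => mergeLoop [(s, e)] rest

def mergeRanges (ranges : List (Int × Int)) : List (Int × Int) :=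
  match PySem.List.sorted2 ranges (fun r => r.1) (fun r => r.2) with
  | [] => []
  | h :: t => mergeLoop [h] t

def loopA (cs : List Char) (pr : List (Int × Int)) (i : Int)
    (stack : List (List Char × Int)) (ranges : List (Int × Int)) : List (Int × Int) :=
  if i + 1 < (cs.length : Int) then
    match hp : findProtectedEnd i pr with
    | some e => loopA cs pr e stack ranges
    | none =>
      let two := PySem.List.slice cs (some i) (some (i + 2))
      if (two = ['*', '*'] ∨ two = ['_', '_']) ∧ ¬ isEscaped cs i then
        match stack with
        | (m, st) :: rest =>
          if m = two then loopA cs pr (i + 2) rest (ranges ++ [(st, i + 2)])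
          else loopA cs pr (i + 2) ((two, i) :: stack) ranges
        | [] => loopA cs pr (i + 2) ((two, i) :: stack) ranges
      else loopA cs pr (i + 1) stack ranges
  else mergeRanges ranges
termination_by ((cs.length : Int) + 1 - i).toNat
decreasing_by
  · exact measDec (by assumption) (findProtectedEnd_lt hp)
  all_goals first
    | exact measDec (by assumption) (lt_add_of_pos_right i two_pos)
    | exact measDec (by assumption) (lt_add_one i)

def find_strong_ranges_py (content : String) (protected_ranges : List (Int × Int)) : List (Int × Int) :=
  loopA content.toList protected_ranges 0 [] []

-- ===== PORT B =====
-- esc[i+1] = (content[i] == '\\' and not esc[i]) : the escape-parity table, built front to back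
def buildEsc (prev : Bool) : List Char → List Bool
  | [] => []
  | c :: rest =>
    let cur := c == '\\' && !prev
    cur :: buildEsc cur rest

-- the inner 'while q < len(prot) and prot[q][0] <= i' sweep step
def advanceB (prot : List (Int × Int)) (i : Int) (q : Nat) (maxEnd : Option Int) : Nat × Option Int :=
  match h : prot[q]? with
  | some (s, e) =>
    if s ≤ i then
      advanceB prot i (q + 1)
        (match maxEnd with
         | none => some e
         | some m => if e > m then some e else some m)
    else (q, maxEnd)
  | none => (q, maxEnd)
termination_by prot.length - q
decreasing_by exact Nat.sub_succ_lt_self _ _ (List.getElem?_eq_some_iff.mp h).1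

def loopB (cs : List Char) (prot : List (Int × Int)) (esc : List Bool) (i : Int)
    (q : Nat) (maxEnd : Option Int)
    (stack : List (Char × Int)) (ranges : List (Int × Int)) : List (Int × Int) :=
  if i + 1 < (cs.length : Int) then
    if hc : (match (advanceB prot i q maxEnd).2 with
             | some e => decide (i < e) | none => false) = true then
      loopB cs prot esc ((advanceB prot i q maxEnd).2.getD 0) (advanceB prot i q maxEnd).1
        (advanceB prot i q maxEnd).2 stack ranges
    else
      if (PySem.List.pyGetD cs i ' ' == PySem.List.pyGetD cs (i + 1) ' ')
          && (PySem.List.pyGetD cs i ' ' == '*' || PySem.List.pyGetD cs i ' ' == '_')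
          && !(PySem.List.pyGetD esc i false) then
        match stack with
        | (m, st) :: rest =>
          if m == PySem.List.pyGetD cs i ' ' then
            loopB cs prot esc (i + 2) (advanceB prot i q maxEnd).1 (advanceB prot i q maxEnd).2
              rest (ranges ++ [(st, i + 2)])
          else
            loopB cs prot esc (i + 2) (advanceB prot i q maxEnd).1 (advanceB prot i q maxEnd).2
              ((PySem.List.pyGetD cs i ' ', i) :: stack) ranges
        | [] =>
          loopB cs prot esc (i + 2) (advanceB prot i q maxEnd).1 (advanceB prot i q maxEnd).2
            ((PySem.List.pyGetD cs i ' ', i) :: stack) ranges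
      else loopB cs prot esc (i + 1) (advanceB prot i q maxEnd).1 (advanceB prot i q maxEnd).2
        stack ranges
  else mergeRanges ranges
termination_by ((cs.length : Int) + 1 - i).toNat
decreasing_by
  · rcases hq : (advanceB prot i q maxEnd).2 with _ | e
    · rw [hq] at hc; exact (Bool.false_ne_true hc).elim
    · rw [hq] at hc; exact measDec (by assumption) (of_decide_eq_true hc)
  all_goals first
    | exact measDec (by assumption) (lt_add_of_pos_right i two_pos)
    | exact measDec (by assumption) (lt_add_one i)

def find_strong_ranges_py_alt (content : String) (protected_ranges : List (Int × Int)) : List (Int × Int) :=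
  let cs := content.toList
  let esc := false :: buildEsc false cs
  let prot := PySem.List.sorted protected_ranges (fun r => r.1) false
  loopB cs prot esc 0 0 none [] []

-- ===== PRECONDITION & SPEC =====
def Spec_find_strong_ranges_py (content : String) (protected_ranges : List (Int × Int)) (out : List (Int × Int)) : Prop := out = find_strong_ranges_py_alt content protected_ranges
instance (content : String) (protected_ranges : List (Int × Int)) (out : List (Int × Int)) : Decidable (Spec_find_strong_ranges_py content protected_ranges out) := by unfold Spec_find_strong_ranges_py; infer_instance

-- ===== CLAIM (what is proved, stated in full; the proofs are below) =====
def Claim_equal_find_strong_ranges_py : Prop := ∀ (content : String) (protected_ranges : List (Int × Int)), Dom_find_strong_ranges_py content protected_ranges → Spec_find_strong_ranges_py content protected_ranges (find_strong_ranges_py content protected_ranges)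

-- ===== LEMMAS AND PROOFS =====

-- position i lies inside some protected range of pr
def Covered (pr : List (Int × Int)) (i : Int) : Prop := ∃ r ∈ pr, r.1 ≤ i ∧ i < r.2

-- the running max of the ends of a prefix of the sweep list
def maxEnds (l : List (Int × Int)) : Option Int :=
  l.foldl (fun o r => match o with
    | none => some r.2
    | some m => if r.2 > m then some r.2 else some m) none

-- weak sweep-state validity: everything before q starts at or before i, maxEnd is the prefix max
def WValid (prot : List (Int × Int)) (i : Int) (q : Nat) (m : Option Int) : Prop :=
  q ≤ prot.length ∧ (∀ r ∈ prot.take q, r.1 ≤ i) ∧ m = maxEnds (prot.take q)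

-- canonical sweep position: q splits prot exactly at i
def Canon (prot : List (Int × Int)) (i : Int) (q : Nat) : Prop :=
  q ≤ prot.length ∧ (∀ r ∈ prot.take q, r.1 ≤ i) ∧ (∀ r ∈ prot.drop q, i < r.1)

theorem fpe_none_iff (i : Int) : ∀ (pr : List (Int × Int)),
    findProtectedEnd i pr = none ↔ ¬ Covered pr i
  | [] => by simp [findProtectedEnd, Covered]
  | (s, t) :: rest => by
    unfold findProtectedEnd
    split
    · simp only [Covered]
      constructor
      · intro h; simp at h
      · intro h; exact absurd ⟨(s, t), by simp, by omega⟩ h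
    · rw [fpe_none_iff i rest]
      simp only [Covered]
      constructor
      · rintro h ⟨r, hr, hri⟩
        rcases List.mem_cons.mp hr with rfl | hr
        · simp at *; omega
        · exact h ⟨r, hr, hri⟩
      · rintro h ⟨r, hr, hri⟩
        exact h ⟨r, List.mem_cons_of_mem _ hr, hri⟩

theorem fpe_some (i e : Int) : ∀ (pr : List (Int × Int)), findProtectedEnd i pr = some e →
    ∃ r ∈ pr, r.1 ≤ i ∧ i < e ∧ r.2 = e := by
  intro pr
  induction pr with
  | nil => intro h; simp [findProtectedEnd] at h
  | cons r rest ih =>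
    intro h
    rw [show findProtectedEnd i (r :: rest) =
        if r.1 ≤ i ∧ i < r.2 then some r.2 else findProtectedEnd i rest from by
      cases r; rfl] at h
    split at h
    · injection h with h
      rename_i hc
      exact ⟨r, List.mem_cons_self, hc.1, h ▸ hc.2, h⟩
    · obtain ⟨x, hx, hp⟩ := ih h
      exact ⟨x, List.mem_cons_of_mem _ hx, hp⟩

theorem maxEnds_foldl_some : ∀ (l : List (Int × Int)) (m : Int),
    l.foldl (fun o r => match o with
      | none => some r.2
      | some m => if r.2 > m then some r.2 else some m) (some m) =
      some (l.foldl (fun a r => max a r.2) m)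
  | [], m => rfl
  | r :: t, m => by
    have h1 : (if r.2 > m then some r.2 else some m) = some (max m r.2) := by
      split <;> [skip; skip] <;> congr 1 <;> omega
    simp only [List.foldl_cons, h1, maxEnds_foldl_some t (max m r.2)]

theorem foldl_max_snd_attained : ∀ (t : List (Int × Int)) (a : Int),
    t.foldl (fun x r => max x r.2) a = a ∨ ∃ r ∈ t, t.foldl (fun x r => max x r.2) a = r.2
  | [], a => Or.inl rfl
  | r :: t, a => by
    simp only [List.foldl_cons]
    rcases foldl_max_snd_attained t (max a r.2) with hm | ⟨x, hx, hm⟩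
    · rcases max_choice a r.2 with h | h
      · exact Or.inl (hm.trans h)
      · exact Or.inr ⟨r, by simp, hm.trans h⟩
    · exact Or.inr ⟨x, by simp [hx], hm⟩

theorem maxEnds_cons (r : Int × Int) (t : List (Int × Int)) :
    maxEnds (r :: t) = some (t.foldl (fun a x => max a x.2) r.2) := by
  simp only [maxEnds, List.foldl_cons]
  exact maxEnds_foldl_some t r.2

theorem maxEnds_some (l : List (Int × Int)) (e : Int) (h : maxEnds l = some e) :
    (∃ r ∈ l, r.2 = e) ∧ ∀ r ∈ l, r.2 ≤ e := by
  rcases l with _ | ⟨r, t⟩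
  · simp [maxEnds] at h
  · rw [maxEnds_cons] at h
    injection h with h
    constructor
    · rcases foldl_max_snd_attained t r.2 with hm | ⟨x, hx, hm⟩
      · exact ⟨r, by simp, by rw [← h, hm]⟩
      · exact ⟨x, by simp [hx], by rw [← h, hm]⟩
    · intro x hx
      rcases List.mem_cons.mp hx with rfl | hx
      · rw [← h]; exact (PySem.List.le_foldl_max_int t (fun x => x.2) x.2).1
      · rw [← h]; exact (PySem.List.le_foldl_max_int t (fun x => x.2) r.2).2 x hx

theorem maxEnds_ne_none (l : List (Int × Int)) (h : l ≠ []) : maxEnds l ≠ none := by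
  rcases l with _ | ⟨r, t⟩
  · exact absurd rfl h
  · rw [maxEnds_cons]; simp

theorem maxEnds_append_singleton (l : List (Int × Int)) (r : Int × Int) :
    maxEnds (l ++ [r]) = (match maxEnds l with
      | none => some r.2
      | some m => if r.2 > m then some r.2 else some m) := by
  simp [maxEnds, List.foldl_append]

theorem advanceB_spec (prot : List (Int × Int)) (i : Int)
    (hs : prot.Pairwise (fun a b => a.1 ≤ b.1)) :
    ∀ (q : Nat) (m : Option Int), WValid prot i q m →
      Canon prot i (advanceB prot i q m).1 ∧
      (advanceB prot i q m).2 = maxEnds (prot.take (advanceB prot i q m).1) := by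
  intro q m h
  obtain ⟨hq, ht, hm⟩ := h
  rw [advanceB]
  split
  · rename_i s e hqe
    obtain ⟨hlt, hel⟩ := List.getElem?_eq_some_iff.mp hqe
    have htake : prot.take (q + 1) = prot.take q ++ [(s, e)] := by
      rw [List.take_succ, hqe]; rfl
    split
    · rename_i hsle
      apply advanceB_spec prot i hs (q + 1)
      refine ⟨by omega, ?_, ?_⟩
      · intro r hr
        rw [htake] at hr
        rcases List.mem_append.mp hr with hr | hr
        · exact ht r hr
        · simp at hr; simp [hr, hsle]
      · rw [htake, maxEnds_append_singleton, ← hm]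
    · rename_i hsgt
      have hdrop : prot.drop q = (s, e) :: prot.drop (q + 1) := by
        rw [List.drop_eq_getElem_cons hlt, hel]
      refine ⟨⟨hq, ht, ?_⟩, hm⟩
      intro r hr
      rw [hdrop] at hr
      rcases List.mem_cons.mp hr with rfl | hr
      · simp; omega
      · have hpd : (prot.drop q).Pairwise (fun a b => a.1 ≤ b.1) :=
          hs.sublist (List.drop_sublist q prot)
        rw [hdrop] at hpd
        have := (List.pairwise_cons.mp hpd).1 r hr
        simp at this ⊢
        omega
  · rename_i hqe
    have hge : prot.length ≤ q := List.getElem?_eq_none_iff.mp hqe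
    have hql : q = prot.length := le_antisymm hq hge
    subst hql
    refine ⟨⟨le_refl _, ht, by simp⟩, hm⟩
termination_by q m _ => prot.length - q
decreasing_by omega

theorem canon_lt_absurd (prot : List (Int × Int)) (i : Int) (q₁ q₂ : Nat)
    (h₁ : Canon prot i q₁) (h₂ : Canon prot i q₂) (hlt : q₁ < q₂) : False := by
  obtain ⟨hle₁, -, hd₁⟩ := h₁
  obtain ⟨hle₂, ht₂, -⟩ := h₂
  have hq₁ : q₁ < prot.length := lt_of_lt_of_le hlt hle₂
  have hmem₁ : prot[q₁] ∈ prot.drop q₁ := by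
    rw [List.drop_eq_getElem_cons hq₁]; exact List.mem_cons_self
  have hmem₂ : prot[q₁] ∈ prot.take q₂ := by
    have : (prot.take q₂)[q₁]'(by simp; omega) = prot[q₁] := List.getElem_take
    rw [← this]; exact List.getElem_mem _
  have ha := hd₁ _ hmem₁
  have hb := ht₂ _ hmem₂
  omega

theorem canon_unique (prot : List (Int × Int)) (i : Int) (q₁ q₂ : Nat)
    (h₁ : Canon prot i q₁) (h₂ : Canon prot i q₂) : q₁ = q₂ := by
  rcases Nat.lt_trichotomy q₁ q₂ with h | h | h
  · exact absurd (canon_lt_absurd prot i q₁ q₂ h₁ h₂ h) (by simp)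
  · exact h
  · exact absurd (canon_lt_absurd prot i q₂ q₁ h₂ h₁ h) (by simp)

theorem advanceB_unique (prot : List (Int × Int)) (i : Int)
    (hs : prot.Pairwise (fun a b => a.1 ≤ b.1))
    (q q' : Nat) (m m' : Option Int) (h : WValid prot i q m) (h' : WValid prot i q' m') :
    advanceB prot i q m = advanceB prot i q' m' := by
  obtain ⟨hc1, hm1⟩ := advanceB_spec prot i hs q m h
  obtain ⟨hc2, hm2⟩ := advanceB_spec prot i hs q' m' h'
  have hqeq := canon_unique prot i _ _ hc1 hc2
  have : (advanceB prot i q m).2 = (advanceB prot i q' m').2 := by rw [hm1, hm2, hqeq]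
  exact Prod.ext hqeq this

-- at a canonical sweep state the jump test is exactly coveredness
theorem flag_iff (prot : List (Int × Int)) (i : Int) (q : Nat) (hc : Canon prot i q) :
    ((match maxEnds (prot.take q) with
      | some e => decide (i < e) | none => false) = true) ↔ Covered prot i := by
  obtain ⟨hq, ht, hd⟩ := hc
  constructor
  · intro hflag
    rcases hme : maxEnds (prot.take q) with _ | e
    · rw [hme] at hflag; simp at hflag
    · rw [hme] at hflag
      simp at hflag
      obtain ⟨⟨r, hr, hre⟩, -⟩ := maxEnds_some _ _ hme
      exact ⟨r, List.take_subset q prot hr, ht r hr, by omega⟩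
  · rintro ⟨r, hr, h1, h2⟩
    have hrt : r ∈ prot.take q := by
      rcases List.mem_append.mp (by rw [List.take_append_drop q prot]; exact hr) with h | h
      · exact h
      · exact absurd (hd r h) (by omega)
    rcases hme : maxEnds (prot.take q) with _ | e
    · exact absurd hme (maxEnds_ne_none (prot.take q)
        (by rintro hnil; rw [hnil] at hrt; exact List.not_mem_nil hrt))
    · obtain ⟨-, hub⟩ := maxEnds_some _ _ hme
      have := hub r hrt
      simp
      omega

-- when the jump fires, its target is the end of a range of prot starting at or before i
theorem flag_target (prot : List (Int × Int)) (i e : Int) (q : Nat)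
    (hc : Canon prot i q) (hm : some e = maxEnds (prot.take q)) :
    ∃ r ∈ prot, r.1 ≤ i ∧ r.2 = e := by
  obtain ⟨⟨r, hr, hre⟩, -⟩ := maxEnds_some _ _ hm.symm
  exact ⟨r, List.take_subset q prot hr, hc.2.1 r hr, hre⟩

theorem covered_sorted_iff (pr : List (Int × Int)) (i : Int) :
    Covered (PySem.List.sorted pr (fun r => r.1) false) i ↔ Covered pr i := by
  unfold Covered
  constructor <;> rintro ⟨r, hr, hp⟩
  · exact ⟨r, (PySem.List.mem_sorted _ _ _ _).mp hr, hp⟩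
  · exact ⟨r, (PySem.List.mem_sorted _ _ _ _).mpr hr, hp⟩

-- escape-parity table vs A's backward backslash count
theorem escChain : ∀ (cs : List Char) (p : Bool) (k : Nat), k < cs.length →
    (p :: buildEsc p cs).getD (k + 1) false =
      ((cs.getD k ' ') == '\\' && !((p :: buildEsc p cs).getD k false)) := by
  intro cs
  induction cs with
  | nil => intro p k h; simp at h
  | cons c rest ih =>
    intro p k h
    simp only [buildEsc]
    rcases k with _ | k
    · simp
    · have h' : k < rest.length := by simpa using h
      have := ih (c == '\\' && !p) k h'
      simpa using this

theorem cb_neg (cs : List Char) (i : Int) (h : i < 0) : countBackslashes cs i = 0 := by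
  rw [countBackslashes, dif_neg]
  rintro ⟨h1, -⟩
  omega

theorem isEscaped_zero (cs : List Char) : isEscaped cs 0 = false := by
  unfold isEscaped
  rw [cb_neg cs _ (by norm_num)]
  simp

theorem parity_flip (x : Nat) : (((x + 1) % 2 == 1) : Bool) = !(x % 2 == 1) := by
  rcases Nat.mod_two_eq_zero_or_one x with h | h <;> simp [Nat.add_mod, h]

theorem isEscaped_succ (cs : List Char) (k : Nat) (h : k < cs.length) :
    isEscaped cs ((k : Int) + 1) = ((cs.getD k ' ') == '\\' && !(isEscaped cs (k : Int))) := by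
  unfold isEscaped
  have h1 : ((k : Int) + 1 - 1) = (k : Int) := by ring
  rw [h1]
  rw [countBackslashes]
  have hget : PySem.List.pyGet? cs (k : Int) = some cs[k] := by
    rw [PySem.List.pyGet?_natCast, List.getElem?_eq_getElem h]
  have hgd : cs.getD k ' ' = cs[k] := List.getD_eq_getElem cs ' ' h
  by_cases hbs : cs[k] = '\\'
  · rw [dif_pos ⟨by omega, by rw [hget, hbs]⟩, hgd, hbs]
    simp only [BEq.rfl, Bool.true_and]
    exact parity_flip _
  · rw [dif_neg (by rintro ⟨-, hcon⟩; rw [hget] at hcon; exact hbs (by injection hcon))]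
    rw [hgd]
    simp [hbs]

theorem escAt_eq (cs : List Char) : ∀ (k : Nat), k ≤ cs.length →
    (false :: buildEsc false cs).getD k false = isEscaped cs (k : Int)
  | 0, _ => by simp [isEscaped_zero]
  | k + 1, hk => by
    have h' : k < cs.length := by omega
    rw [escChain cs false k h', escAt_eq cs k (by omega)]
    rw [show ((k + 1 : Nat) : Int) = (k : Int) + 1 by push_cast; ring]
    rw [isEscaped_succ cs k h']

theorem slice_two (cs : List Char) (k : Nat) (h : k + 1 < cs.length) :
    PySem.List.slice cs (some (k : Int)) (some ((k : Int) + 2)) = [cs[k], cs[k + 1]] := by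
  rw [show ((k : Int) + 2) = ((k : Int) + ((2 : Nat) : Int)) by norm_num]
  rw [PySem.List.slice_natCast_add]
  rw [List.drop_eq_getElem_cons (by omega), List.drop_eq_getElem_cons h]
  rfl

theorem WValid_mono (prot : List (Int × Int)) (i j : Int) (q : Nat) (m : Option Int)
    (h : WValid prot i q m) (hij : i ≤ j) : WValid prot j q m :=
  ⟨h.1, fun r hr => le_trans (h.2.1 r hr) hij, h.2.2⟩

-- one-step unfolding lemmas for the two loops
theorem loopA_exit (cs : List Char) (pr : List (Int × Int)) (i : Int)
    (st : List (List Char × Int)) (r : List (Int × Int))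
    (h : ¬ (i + 1 < (cs.length : Int))) : loopA cs pr i st r = mergeRanges r := by
  rw [loopA, if_neg h]

theorem loopA_protected (cs : List Char) (pr : List (Int × Int)) (i e : Int)
    (st : List (List Char × Int)) (r : List (Int × Int))
    (hL : i + 1 < (cs.length : Int)) (h : findProtectedEnd i pr = some e) :
    loopA cs pr i st r = loopA cs pr e st r := by
  rw [loopA, if_pos hL]
  split
  · rename_i e' heq
    rw [h] at heq
    injection heq with heq
    rw [heq]
  · rename_i heq
    rw [h] at heq
    cases heq

theorem loopA_none (cs : List Char) (pr : List (Int × Int)) (i : Int)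
    (st : List (List Char × Int)) (r : List (Int × Int))
    (hL : i + 1 < (cs.length : Int)) (h : findProtectedEnd i pr = none) :
    loopA cs pr i st r =
      (if (PySem.List.slice cs (some i) (some (i + 2)) = ['*', '*'] ∨
           PySem.List.slice cs (some i) (some (i + 2)) = ['_', '_']) ∧ ¬ isEscaped cs i then
        match st with
        | (m, s0) :: rest =>
          if m = PySem.List.slice cs (some i) (some (i + 2)) then
            loopA cs pr (i + 2) rest (r ++ [(s0, i + 2)])
          else loopA cs pr (i + 2) ((PySem.List.slice cs (some i) (some (i + 2)), i) :: st) r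
        | [] => loopA cs pr (i + 2) ((PySem.List.slice cs (some i) (some (i + 2)), i) :: st) r
      else loopA cs pr (i + 1) st r) := by
  rw [loopA, if_pos hL]
  split
  · rename_i e' heq
    rw [h] at heq
    cases heq
  · rfl

theorem loopB_exit (cs : List Char) (prot : List (Int × Int)) (esc : List Bool) (i : Int)
    (q : Nat) (m : Option Int) (st : List (Char × Int)) (r : List (Int × Int))
    (h : ¬ (i + 1 < (cs.length : Int))) : loopB cs prot esc i q m st r = mergeRanges r := by
  conv_lhs => rw [loopB.eq_def]
  rw [if_neg h]

theorem loopB_jump (cs : List Char) (prot : List (Int × Int)) (esc : List Bool) (i : Int)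
    (q : Nat) (m : Option Int) (st : List (Char × Int)) (r : List (Int × Int))
    (hL : i + 1 < (cs.length : Int))
    (hflag : (match (advanceB prot i q m).2 with
              | some e => decide (i < e) | none => false) = true) :
    loopB cs prot esc i q m st r =
      loopB cs prot esc ((advanceB prot i q m).2.getD 0) (advanceB prot i q m).1
        (advanceB prot i q m).2 st r := by
  conv_lhs => rw [loopB.eq_def]
  rw [if_pos hL, dif_pos hflag]

theorem loopB_nojump (cs : List Char) (prot : List (Int × Int)) (esc : List Bool) (i : Int)
    (q : Nat) (m : Option Int) (st : List (Char × Int)) (r : List (Int × Int))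
    (hL : i + 1 < (cs.length : Int))
    (hflag : (match (advanceB prot i q m).2 with
              | some e => decide (i < e) | none => false) = false) :
    loopB cs prot esc i q m st r =
      (if (PySem.List.pyGetD cs i ' ' == PySem.List.pyGetD cs (i + 1) ' ') &&
          (PySem.List.pyGetD cs i ' ' == '*' || PySem.List.pyGetD cs i ' ' == '_') &&
          !(PySem.List.pyGetD esc i false) then
        match st with
        | (m', s0) :: rest =>
          if m' == PySem.List.pyGetD cs i ' ' then
            loopB cs prot esc (i + 2) (advanceB prot i q m).1 (advanceB prot i q m).2 rest
              (r ++ [(s0, i + 2)])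
          else
            loopB cs prot esc (i + 2) (advanceB prot i q m).1 (advanceB prot i q m).2
              ((PySem.List.pyGetD cs i ' ', i) :: st) r
        | [] =>
          loopB cs prot esc (i + 2) (advanceB prot i q m).1 (advanceB prot i q m).2
            ((PySem.List.pyGetD cs i ' ', i) :: st) r
      else loopB cs prot esc (i + 1) (advanceB prot i q m).1 (advanceB prot i q m).2 st r) := by
  conv_lhs => rw [loopB.eq_def]
  rw [if_pos hL, dif_neg (by simp [hflag])]

-- first uncovered position at or after i, by fuel
def firstUnc (pr : List (Int × Int)) (i : Int) : Nat → Int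
  | 0 => i
  | f + 1 => if ∃ r ∈ pr, r.1 ≤ i ∧ i < r.2 then firstUnc pr (i + 1) f else i

theorem firstUnc_spec (pr : List (Int × Int)) :
    ∀ (f : Nat) (i : Int), ¬ Covered pr (i + f) →
      i ≤ firstUnc pr i f ∧ ¬ Covered pr (firstUnc pr i f) ∧
      ∀ t, i ≤ t → t < firstUnc pr i f → Covered pr t
  | 0, i, h => by
    simp only [firstUnc]
    exact ⟨le_refl _, by simpa using h, fun t h1 h2 => absurd (lt_of_le_of_lt h1 h2) (lt_irrefl _)⟩
  | f + 1, i, h => by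
    simp only [firstUnc]
    split
    · rename_i hcov
      have h' : ¬ Covered pr ((i + 1) + f) := by
        have he : ((i + 1) + (f : Int)) = i + ((f + 1 : Nat) : Int) := by push_cast; ring
        rw [he]; exact h
      obtain ⟨h1, h2, h3⟩ := firstUnc_spec pr f (i + 1) h'
      refine ⟨by omega, h2, ?_⟩
      intro t ht1 ht2
      rcases eq_or_lt_of_le ht1 with rfl | ht1
      · exact hcov
      · exact h3 t (by omega) ht2
    · rename_i hcov
      exact ⟨le_refl _, by simpa [Covered] using hcov,
        fun t h1 h2 => absurd (lt_of_le_of_lt h1 h2) (lt_irrefl _)⟩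

theorem exists_uncovered (pr : List (Int × Int)) (i : Int) :
    ∃ f : Nat, ¬ Covered pr (i + f) := by
  have hb := PySem.List.le_foldl_max_int pr (fun r => r.2) i
  set B := pr.foldl (fun acc y => max acc y.2) i with hB
  refine ⟨(B - i).toNat, ?_⟩
  rintro ⟨r, hr, h1, h2⟩
  have := hb.2 r hr
  omega

-- skipping a fully covered stretch, A side
theorem regionA (cs : List Char) (pr : List (Int × Int)) (st : List (List Char × Int))
    (r : List (Int × Int)) :
    ∀ (d : Nat) (i j : Int), i ≤ j → (j - i).toNat ≤ d →
      (∀ t, i ≤ t → t < j → Covered pr t) → ¬ Covered pr j →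
      loopA cs pr i st r = loopA cs pr j st r := by
  intro d
  induction d with
  | zero =>
    intro i j h1 h2 h3 h4
    have : i = j := by omega
    rw [this]
  | succ d ih =>
    intro i j h1 h2 h3 h4
    rcases eq_or_lt_of_le h1 with rfl | hlt
    · rfl
    · have hcov : Covered pr i := h3 i le_rfl hlt
      by_cases hL : i + 1 < (cs.length : Int)
      · rcases hfe : findProtectedEnd i pr with _ | e
        · exact absurd hcov (by rwa [fpe_none_iff i pr] at hfe)
        · obtain ⟨r0, hr0, hra, hrb, hrc⟩ := fpe_some i e pr hfe
          have hej : e ≤ j := by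
            by_contra hcon
            exact h4 ⟨r0, hr0, by omega, by omega⟩
          rw [loopA_protected cs pr i e st r hL hfe]
          exact ih e j hej (by omega) (fun t ht1 ht2 => h3 t (by omega) ht2) h4
      · rw [loopA_exit cs pr i st r hL, loopA_exit cs pr j st r (by omega)]

-- the sweep state is invisible: any two weakly valid states at j behave alike
theorem loopB_stateIrrel (cs : List Char) (prot : List (Int × Int)) (esc : List Bool)
    (hs : prot.Pairwise (fun a b => a.1 ≤ b.1))
    (j : Int) (q q' : Nat) (m m' : Option Int) (st : List (Char × Int)) (r : List (Int × Int))
    (h : WValid prot j q m) (h' : WValid prot j q' m') :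
    loopB cs prot esc j q m st r = loopB cs prot esc j q' m' st r := by
  by_cases hL : j + 1 < (cs.length : Int)
  · have hadv := advanceB_unique prot j hs q q' m m' h h'
    conv_lhs => rw [loopB.eq_def]
    conv_rhs => rw [loopB.eq_def]
    rw [if_pos hL, if_pos hL, hadv]
  · rw [loopB_exit cs prot esc j q m st r hL, loopB_exit cs prot esc j q' m' st r hL]

-- skipping a fully covered stretch, B side
theorem regionB (cs : List Char) (prot : List (Int × Int)) (esc : List Bool)
    (hs : prot.Pairwise (fun a b => a.1 ≤ b.1)) (st : List (Char × Int)) (r : List (Int × Int)) :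
    ∀ (d : Nat) (i j : Int) (q : Nat) (m : Option Int), WValid prot i q m → i ≤ j →
      (j - i).toNat ≤ d → (∀ t, i ≤ t → t < j → Covered prot t) → ¬ Covered prot j →
      loopB cs prot esc i q m st r = loopB cs prot esc j q m st r := by
  intro d
  induction d with
  | zero =>
    intro i j q m hW h1 h2 h3 h4
    have : i = j := by omega
    rw [this]
  | succ d ih =>
    intro i j q m hW h1 h2 h3 h4
    rcases eq_or_lt_of_le h1 with rfl | hlt
    · rfl
    · have hcov : Covered prot i := h3 i le_rfl hlt
      by_cases hL : i + 1 < (cs.length : Int)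
      · obtain ⟨hcanon, hmax⟩ := advanceB_spec prot i hs q m hW
        have hflag : (match (advanceB prot i q m).2 with
            | some e => decide (i < e) | none => false) = true := by
          rw [hmax]
          exact (flag_iff prot i _ hcanon).mpr hcov
        rcases h2e : (advanceB prot i q m).2 with _ | e
        · rw [h2e] at hflag; simp at hflag
        · have hie : i < e := by rw [h2e] at hflag; simpa using hflag
          rw [h2e] at hmax
          obtain ⟨r0, hr0, hra, hrb⟩ :=
            flag_target prot i e (advanceB prot i q m).1 hcanon hmax
          have hej : e ≤ j := by
            by_contra hcon
            exact h4 ⟨r0, hr0, by omega, by omega⟩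
          rw [loopB_jump cs prot esc i q m st r hL hflag, h2e, Option.getD_some]
          have hWe : WValid prot e (advanceB prot i q m).1 (some e) :=
            ⟨hcanon.1, fun x hx => le_trans (hcanon.2.1 x hx) (by omega), hmax⟩
          have hstep := ih e j (advanceB prot i q m).1 (some e) hWe hej (by omega)
            (fun t ht1 ht2 => h3 t (by omega) ht2) h4
          rw [hstep]
          exact loopB_stateIrrel cs prot esc hs j (advanceB prot i q m).1 q (some e) m st r
            (WValid_mono prot e j _ _ hWe hej) (WValid_mono prot i j q m hW h1)
      · rw [loopB_exit cs prot esc i q m st r hL, loopB_exit cs prot esc j q m st r (by omega)]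

-- A's stack entries are B's with the marker written out as its two characters
def liftSt (st : List (Char × Int)) : List (List Char × Int) :=
  st.map (fun r => (([r.1, r.1] : List Char), r.2))

theorem mainEq (cs : List Char) (pr : List (Int × Int)) :
    ∀ (fuel : Nat) (i : Int) (q : Nat) (m : Option Int) (st : List (Char × Int))
      (r : List (Int × Int)), 0 ≤ i → ((cs.length : Int) + 1 - i).toNat ≤ fuel →
      WValid (PySem.List.sorted pr (fun x => x.1) false) i q m →
      loopA cs pr i (liftSt st) r =
        loopB cs (PySem.List.sorted pr (fun x => x.1) false) (false :: buildEsc false cs) i q m st r := by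
  have hs : (PySem.List.sorted pr (fun x => x.1) false).Pairwise (fun a b => a.1 ≤ b.1) :=
    PySem.List.sorted_pairwise pr (fun x => x.1)
  set prot := PySem.List.sorted pr (fun x => x.1) false with hprot
  set esc := (false :: buildEsc false cs) with hesc
  intro fuel
  induction fuel with
  | zero =>
    intro i q m st r h0 hfuel hW
    have hL : ¬ (i + 1 < (cs.length : Int)) := by omega
    rw [loopA_exit cs pr i _ r hL, loopB_exit cs prot esc i q m st r hL]
  | succ fuel ih =>
    intro i q m st r h0 hfuel hW
    by_cases hL : i + 1 < (cs.length : Int)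
    swap
    · rw [loopA_exit cs pr i _ r hL, loopB_exit cs prot esc i q m st r hL]
    by_cases hcov : Covered pr i
    · obtain ⟨f, hf⟩ := exists_uncovered pr i
      obtain ⟨hU1, hU2, hU3⟩ := firstUnc_spec pr f i hf
      have hUi : i < firstUnc pr i f := by
        rcases eq_or_lt_of_le hU1 with heq | h
        · exfalso; apply hU2; rw [← heq]; exact hcov
        · exact h
      rw [regionA cs pr (liftSt st) r (firstUnc pr i f - i).toNat i _ hU1 le_rfl hU3 hU2]
      rw [regionB cs prot esc hs st r (firstUnc pr i f - i).toNat i _ q m hW hU1 le_rfl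
        (fun t ht1 ht2 => by
          rw [hprot, covered_sorted_iff pr t]; exact hU3 t ht1 ht2)
        (fun hc => hU2 (by rw [hprot, covered_sorted_iff pr _] at hc; exact hc))]
      exact ih (firstUnc pr i f) q m st r (by omega) (by omega)
        (WValid_mono prot i _ q m hW hU1)
    · obtain ⟨k, rfl⟩ : ∃ k : Nat, i = (k : Nat) := ⟨i.toNat, (Int.toNat_of_nonneg h0).symm⟩
      have hk1 : k + 1 < cs.length := by omega
      have hfe : findProtectedEnd (k : Int) pr = none := (fpe_none_iff _ pr).mpr hcov
      obtain ⟨hcanon, hmax⟩ := advanceB_spec prot (k : Int) hs q m hW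
      have hflag : (match (advanceB prot (k : Int) q m).2 with
          | some e => decide ((k : Int) < e) | none => false) = false := by
        rcases hfv : (advanceB prot (k : Int) q m).2 with _ | e
        · rfl
        · by_contra hcon
          have hament : Covered prot (k : Int) := by
            apply (flag_iff prot _ _ hcanon).mp
            rw [← hmax, hfv]
            simpa using hcon
          exact hcov (by rw [hprot, covered_sorted_iff pr _] at hament; exact hament)
      rw [loopA_none cs pr (k : Int) (liftSt st) r hL hfe]
      rw [loopB_nojump cs prot esc (k : Int) q m st r hL hflag]
      have htwo : PySem.List.slice cs (some (k : Int)) (some ((k : Int) + 2)) = [cs[k], cs[k + 1]] :=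
        slice_two cs k hk1
      have hc0 : PySem.List.pyGetD cs (k : Int) ' ' = cs[k] := by
        rw [PySem.List.pyGetD_natCast]; exact List.getD_eq_getElem cs ' ' (by omega)
      have hc1 : PySem.List.pyGetD cs ((k : Int) + 1) ' ' = cs[k + 1] := by
        rw [show ((k : Int) + 1) = ((k + 1 : Nat) : Int) by push_cast; ring,
          PySem.List.pyGetD_natCast]
        exact List.getD_eq_getElem cs ' ' hk1
      have hescv : PySem.List.pyGetD esc (k : Int) false = isEscaped cs (k : Int) := by
        rw [hesc, PySem.List.pyGetD_natCast]; exact escAt_eq cs k (by omega)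
      rw [htwo, hc0, hc1, hescv]
      have hWadv : WValid prot (k : Int) (advanceB prot (k : Int) q m).1
          (advanceB prot (k : Int) q m).2 := ⟨hcanon.1, hcanon.2.1, hmax⟩
      have hWk1 := WValid_mono prot _ _ _ _ hWadv (by omega : (k : Int) ≤ (k : Int) + 1)
      have hWk2 := WValid_mono prot _ _ _ _ hWadv (by omega : (k : Int) ≤ (k : Int) + 2)
      by_cases hcond : cs[k] = cs[k + 1] ∧ (cs[k] = '*' ∨ cs[k] = '_') ∧
          isEscaped cs (k : Int) = false
      · obtain ⟨hcc, hstar, hescf⟩ := hcond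
        have hA : ([cs[k], cs[k + 1]] = ['*', '*'] ∨ [cs[k], cs[k + 1]] = ['_', '_']) ∧
            ¬ isEscaped cs (k : Int) := by
          refine ⟨?_, by simp [hescf]⟩
          rcases hstar with h | h
          · left; rw [← hcc, h]
          · right; rw [← hcc, h]
        have hB : ((cs[k] == cs[k + 1]) && (cs[k] == '*' || cs[k] == '_') &&
            !(isEscaped cs (k : Int))) = true := by
          rcases hstar with h | h <;> simp [← hcc, h, hescf]
        rw [if_pos hA, if_pos hB]
        cases st with
        | nil =>
          have h := ih ((k : Int) + 2) _ _ [(cs[k], (k : Int))] r (by omega) (by omega) hWk2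
          simpa [liftSt, ← hcc] using h
        | cons hd tl =>
          obtain ⟨mc, sp⟩ := hd
          by_cases hmc : mc = cs[k]
          · have hAm : ([mc, mc] : List Char) = [cs[k], cs[k + 1]] := by rw [hmc, ← hcc]
            have h := ih ((k : Int) + 2) _ _ tl (r ++ [(sp, (k : Int) + 2)]) (by omega)
              (by omega) hWk2
            simp only [liftSt, List.map_cons]
            rw [if_pos hAm, if_pos (by simp [hmc])]
            simpa [liftSt] using h
          · have hAm : ¬ (([mc, mc] : List Char) = [cs[k], cs[k + 1]]) := by
              intro hcon
              injection hcon with h1 _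
              exact hmc h1
            have h := ih ((k : Int) + 2) _ _ ((cs[k], (k : Int)) :: (mc, sp) :: tl) r (by omega)
              (by omega) hWk2
            simp only [liftSt, List.map_cons]
            rw [if_neg hAm, if_neg (by simp [hmc])]
            simpa [liftSt, ← hcc] using h
      · have hA : ¬ ((([cs[k], cs[k + 1]] : List Char) = ['*', '*'] ∨
            ([cs[k], cs[k + 1]] : List Char) = ['_', '_']) ∧ ¬ isEscaped cs (k : Int)) := by
          rintro ⟨hor, hne⟩
          apply hcond
          rcases hor with h | h <;>
            (injection h with h1 h2; injection h2 with h2 _)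
          · exact ⟨h1.trans h2.symm, Or.inl h1, by simpa using hne⟩
          · exact ⟨h1.trans h2.symm, Or.inr h1, by simpa using hne⟩
        have hB : ¬ (((cs[k] == cs[k + 1]) && (cs[k] == '*' || cs[k] == '_') &&
            !(isEscaped cs (k : Int))) = true) := by
          intro hcon
          simp only [Bool.and_eq_true, beq_iff_eq, Bool.or_eq_true, Bool.not_eq_true'] at hcon
          exact hcond ⟨hcon.1.1, hcon.1.2, hcon.2⟩
        rw [if_neg hA, if_neg hB]
        exact ih ((k : Int) + 1) _ _ st r (by omega) (by omega) hWk1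

-- ===== VERDICT (by name: the statement is the Claim_ definition above) =====
theorem find_strong_ranges_py_spec : Claim_equal_find_strong_ranges_py := by
  intro content pr _
  unfold Spec_find_strong_ranges_py find_strong_ranges_py find_strong_ranges_py_alt
  have h := mainEq content.toList pr ((content.toList.length + 1)) 0 0 none [] []
    (by omega) (by omega) (by refine ⟨by omega, by simp, rfl⟩)
  simpa [liftSt] using h
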